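-- pv_equiv track=rewrite | github.com/chaosxlive/ProblemSolving | Leetcode/2001-3000/2901-3000/2931. Maximum Spending After Buying Items.py | maxSpending
-- ===== SOURCE A (Python) =====
-- from typing import List
-- import heapq
--
-- def maxSpending(values: List[List[int]]) -> int:
--     h = [(vs.pop(), i) for i, vs in enumerate(values)]
--     heapq.heapify(h)
--     result = 0
--     day = 1
--     while len(h) > 0:
--         v, i = heapq.heappop(h)
--         result += v * day
--         day += 1
--         if len(values[i]) > 0:
--             heapq.heappush(h, (values[i].pop(), i))
--     return result
-- ===== SOURCE B (Python) =====
-- def maxSpending(values):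
--     # Same greedy merge as the heap version, done by a linear min-scan over
--     # the shops' current last elements each day (no heapq).
--     # Like A, this mutates `values` (pops every shop empty).
--     result = 0
--     day = 1
--     while True:
--         best = None  # (value, shop index) with the smallest current last element
--         for i, vs in enumerate(values):
--             if vs and (best is None or vs[-1] < best[0]):
--                 best = (vs[-1], i)
--         if best is None:
--             break
--         v, i = best
--         values[i].pop()
--         result += v * day
--         day += 1
--     return result
-- ===== Notes on version B (the rewrite author's own statement) =====
-- stated objective: simpler
-- what changed: Replaces the heapq priority queue with a per-day linear scan that picks the shop whose current last element is minimal (ties to the smallest index, matching the heap's tuple order), so the heap data structure and its initial pop-all comprehension disappear.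
import Mathlib
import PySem

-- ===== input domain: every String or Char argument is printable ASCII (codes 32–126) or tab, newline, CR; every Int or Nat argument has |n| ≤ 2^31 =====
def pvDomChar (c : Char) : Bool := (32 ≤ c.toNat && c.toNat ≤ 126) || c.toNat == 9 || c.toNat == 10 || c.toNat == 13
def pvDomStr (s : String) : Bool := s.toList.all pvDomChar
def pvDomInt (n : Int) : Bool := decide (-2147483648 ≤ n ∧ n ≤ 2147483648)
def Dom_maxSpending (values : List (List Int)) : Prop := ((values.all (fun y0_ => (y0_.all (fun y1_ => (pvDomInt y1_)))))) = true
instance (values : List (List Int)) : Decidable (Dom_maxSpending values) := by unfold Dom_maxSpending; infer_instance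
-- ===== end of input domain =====

-- B drops heapq: a per-day linear min-scan over the shops' current last elements
-- replaces the priority queue (same greedy merge). Equivalence is about the return
-- value; both Pythons mutate `values` identically (they pop every shop empty).

-- ===== PORT A =====
-- The heap is modelled as a plain list of (value, index) pairs under Python's
-- tuple order: heapify is the identity on this model, heappop scans for the
-- lexicographically least pair and erases it, heappush appends.
def lexLt (a b : Int × Nat) : Bool := a.1 < b.1 || (a.1 == b.1 && a.2 < b.2)

-- the minimum (under tuple order) that heappop returns
def heapMin (x : Int × Nat) (l : List (Int × Nat)) : Int × Nat :=
  match l with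
  | [] => x
  | y :: l => heapMin (if lexLt y x then y else x) l

theorem heapMin_mem (l : List (Int × Nat)) (x : Int × Nat) : heapMin x l ∈ x :: l := by
  induction l generalizing x with
  | nil => simp [heapMin]
  | cons y l ih =>
      simp only [heapMin, List.mem_cons]
      split
      · rcases List.mem_cons.1 (ih y) with h | h
        · right; left; exact h
        · right; right; exact h
      · rcases List.mem_cons.1 (ih x) with h | h
        · left; exact h
        · right; right; exact h

theorem sumLen_set (vs : List (List Int)) (j : Nat) (l : List Int) (hj : j < vs.length) :
    ((vs.set j l).map List.length).sum + vs[j].length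
      = (vs.map List.length).sum + l.length := by
  induction vs generalizing j with
  | nil => simp at hj
  | cons a vs ih =>
      cases j with
      | zero => simp [List.set]; omega
      | succ j =>
          simp only [List.set, List.map_cons, List.sum_cons, List.getElem_cons_succ]
          have := ih j (by simpa using hj)
          omega

theorem getD_ne_nil_lt {vs : List (List Int)} {i : Nat} (h : vs.getD i [] ≠ []) :
    i < vs.length := by
  by_contra hc
  rw [List.getD_eq_getElem?_getD, List.getElem?_eq_none (by omega)] at h
  simp at h

-- while len(h) > 0: v,i = heappop(h); result += v*day; day += 1;
--   if len(values[i]) > 0: heappush(h, (values[i].pop(), i))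
def aLoop (values : List (List Int)) (h : List (Int × Nat)) (result day : Int) : Int :=
  match h with
  | [] => result
  | x :: hs =>
    let m := heapMin x hs
    let h' := (x :: hs).erase m
    let lst := values.getD m.2 []
    if hl : lst = [] then
      aLoop values h' (result + m.1 * day) (day + 1)
    else
      aLoop (values.set m.2 lst.dropLast) (h' ++ [(lst.getLastD 0, m.2)])
        (result + m.1 * day) (day + 1)
  termination_by h.length + (values.map List.length).sum
  decreasing_by
  · have hm : heapMin x hs ∈ x :: hs := heapMin_mem hs x
    have := List.length_erase_of_mem hm
    simp_all
  · have hm : heapMin x hs ∈ x :: hs := heapMin_mem hs x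
    have h1 := List.length_erase_of_mem hm
    have hl' : values.getD (heapMin x hs).2 [] ≠ [] := hl
    have h2 : (heapMin x hs).2 < values.length := getD_ne_nil_lt hl'
    have hg : values.getD (heapMin x hs).2 [] = values[(heapMin x hs).2] := by
      rw [List.getD_eq_getElem?_getD, List.getElem?_eq_getElem h2]; rfl
    have h3 := sumLen_set values (heapMin x hs).2 (values.getD (heapMin x hs).2 []).dropLast h2
    rw [hg] at hl' h3 ⊢
    have h4 : 0 < values[(heapMin x hs).2].length := List.length_pos_of_ne_nil hl'
    simp only [List.length_append, h1, List.length_cons, List.length_nil,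
      List.length_dropLast] at h3 ⊢
    omega

-- h = [(vs.pop(), i) for i, vs in enumerate(values)] — vs.pop() raises
-- IndexError on an empty shop (excluded by Pre_); getLastD 0 is a dummy there.
def initHeap (i : Nat) (values : List (List Int)) : List (Int × Nat) :=
  match values with
  | [] => []
  | l :: rest => (l.getLastD 0, i) :: initHeap (i + 1) rest

def maxSpending (values : List (List Int)) : Int :=
  aLoop (values.map List.dropLast) (initHeap 0 values) 0 1

-- ===== PORT B =====
-- the current last elements of the still nonempty shops, with their indices
def front (i : Nat) (values : List (List Int)) : List (Int × Nat) :=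
  match values with
  | [] => []
  | vs :: rest =>
      match vs.getLast? with
      | none => front (i + 1) rest
      | some v => (v, i) :: front (i + 1) rest

-- for i, vs in enumerate(values): if vs and (best is None or vs[-1] < best[0]): best = (vs[-1], i)
def bestScan (i : Nat) (values : List (List Int)) (best : Option (Int × Nat)) :
    Option (Int × Nat) :=
  match values with
  | [] => best
  | vs :: rest =>
      bestScan (i + 1) rest
        (match vs.getLast? with
         | none => best
         | some v =>
             match best with
             | none => some (v, i)
             | some b => if v < b.1 then some (v, i) else best)

-- the same scan, as a fold over the frontier
def foldB (best : Option (Int × Nat)) (l : List (Int × Nat)) : Option (Int × Nat) :=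
  match l with
  | [] => best
  | p :: l =>
      foldB
        (match best with
         | none => some p
         | some b => if p.1 < b.1 then some p else best) l

theorem bestScan_eq_foldB (values : List (List Int)) :
    ∀ (i : Nat) (best : Option (Int × Nat)),
      bestScan i values best = foldB best (front i values) := by
  induction values with
  | nil => intro i best; rfl
  | cons vs rest ih =>
      intro i best
      simp only [bestScan, front]
      cases vs.getLast? with
      | none => exact ih (i + 1) best
      | some v => simp only [foldB]; exact ih (i + 1) _

theorem foldB_mem (l : List (Int × Nat)) :
    ∀ (best : Option (Int × Nat)) (m : Int × Nat),
      foldB best l = some m → m ∈ l ∨ best = some m := by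
  induction l with
  | nil => intro best m h; right; exact h
  | cons p l ih =>
      intro best m h
      simp only [foldB] at h
      rcases ih _ m h with h2 | h2
      · left; exact List.mem_cons_of_mem _ h2
      · cases best with
        | none => left; simp at h2; simp [h2]
        | some b =>
            by_cases hpb : p.1 < b.1 <;> simp [hpb] at h2
            · left; simp [h2]
            · right; rw [h2]

theorem front_mem {m : Int × Nat} (values : List (List Int)) :
    ∀ (i : Nat), m ∈ front i values →
      ∃ t, ∃ _ : t < values.length, m.2 = i + t ∧ values[t].getLast? = some m.1 := by
  induction values with
  | nil => intro i h; simp [front] at h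
  | cons vs rest ih =>
      intro i h
      simp only [front] at h
      cases hg : vs.getLast? with
      | none =>
          rw [hg] at h
          obtain ⟨t, ht, h1, h2⟩ := ih (i + 1) h
          exact ⟨t + 1, by simp; omega, by omega, by simpa using h2⟩
      | some v =>
          rw [hg] at h
          rcases List.mem_cons.1 h with h | h
          · subst h; exact ⟨0, by simp, by simp, by simpa using hg⟩
          · obtain ⟨t, ht, h1, h2⟩ := ih (i + 1) h
            exact ⟨t + 1, by simp; omega, by omega, by simpa using h2⟩

theorem bestScan_some {values : List (List Int)} {v : Int} {j : Nat}
    (h : bestScan 0 values none = some (v, j)) :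
    j < values.length ∧ values.getD j [] ≠ [] := by
  rw [bestScan_eq_foldB] at h
  rcases foldB_mem _ _ _ h with h2 | h2
  · obtain ⟨t, ht, h1, h2⟩ := front_mem values 0 h2
    simp only at h1
    have hj : j = t := by omega
    subst hj
    refine ⟨ht, ?_⟩
    rw [List.getD_eq_getElem?_getD, List.getElem?_eq_getElem ht]
    intro hc
    simp only [Option.getD_some] at hc
    rw [hc] at h2; simp at h2
  · simp at h2

-- while True: scan for best; if none: break; pop it, add v*day
def bLoop (values : List (List Int)) (result day : Int) : Int :=
  match hb : bestScan 0 values none with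
  | none => result
  | some (v, i) =>
      bLoop (values.set i ((values.getD i []).dropLast)) (result + v * day) (day + 1)
  termination_by (values.map List.length).sum
  decreasing_by
    have ⟨h1, h2⟩ := bestScan_some hb
    have hg : values.getD i [] = values[i] := by
      rw [List.getD_eq_getElem?_getD, List.getElem?_eq_getElem h1]; rfl
    have h3 := sumLen_set values i (values.getD i []).dropLast h1
    rw [hg] at h2 h3 ⊢
    have h4 : 0 < values[i].length := List.length_pos_of_ne_nil h2
    simp only [List.length_dropLast] at h3 ⊢
    omega

def maxSpending_alt (values : List (List Int)) : Int :=
  bLoop values 0 1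

-- ===== PRECONDITION & SPEC =====
-- Pre_ excludes exactly the inputs containing an empty shop: there `vs.pop()` in
-- A's initial comprehension raises IndexError (A returns on everything else).
def Pre_maxSpending (values : List (List Int)) : Prop := [] ∉ values
instance (values : List (List Int)) : Decidable (Pre_maxSpending values) := by
  unfold Pre_maxSpending; infer_instance

def pvWitness_maxSpending : List (List Int) := [[1, 3], [2], [4, 5]]

def Spec_maxSpending (values : List (List Int)) (out : Int) : Prop := out = maxSpending_alt values
instance (values : List (List Int)) (out : Int) : Decidable (Spec_maxSpending values out) := by unfold Spec_maxSpending; infer_instance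

-- ===== CLAIM (what is proved, stated in full; the proofs are below) =====
def Claim_equal_maxSpending : Prop := ∀ (values : List (List Int)), Dom_maxSpending values → Pre_maxSpending values → Spec_maxSpending values (maxSpending values)

-- ===== LEMMAS AND PROOFS =====

theorem lexLt_iff (a b : Int × Nat) :
    lexLt a b = true ↔ (a.1 < b.1 ∨ (a.1 = b.1 ∧ a.2 < b.2)) := by
  simp [lexLt]

theorem lexLt_trans {a b c : Int × Nat} (h1 : lexLt a b = true) (h2 : lexLt b c = true) :
    lexLt a c = true := by
  rw [lexLt_iff] at *; omega

theorem not_lexLt {a b : Int × Nat} (h : ¬ lexLt a b = true) :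
    b = a ∨ lexLt b a = true := by
  obtain ⟨a1, a2⟩ := a; obtain ⟨b1, b2⟩ := b
  simp only [lexLt_iff, Prod.mk.injEq] at *
  omega

theorem lexLe_trans {m b c : Int × Nat} (h1 : m = b ∨ lexLt m b = true)
    (h2 : b = c ∨ lexLt b c = true) : m = c ∨ lexLt m c = true := by
  rcases h1 with rfl | h1
  · exact h2
  rcases h2 with rfl | h2
  · right; exact h1
  · right; exact lexLt_trans h1 h2

def IsMin' (m : Int × Nat) (l : List (Int × Nat)) : Prop :=
  m ∈ l ∧ ∀ y ∈ l, m = y ∨ lexLt m y = true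

theorem isMin_unique {m m' : Int × Nat} {l : List (Int × Nat)}
    (h : IsMin' m l) (h' : IsMin' m' l) : m = m' := by
  rcases h.2 m' h'.1 with h1 | h1
  · exact h1
  rcases h'.2 m h.1 with h2 | h2
  · exact h2.symm
  exfalso
  obtain ⟨a1, a2⟩ := m; obtain ⟨b1, b2⟩ := m'
  rw [lexLt_iff] at h1 h2
  simp only at h1 h2
  omega

theorem isMin_perm {l l' : List (Int × Nat)} (hp : l.Perm l') {m : Int × Nat}
    (h : IsMin' m l) : IsMin' m l' :=
  ⟨hp.mem_iff.1 h.1, fun y hy => h.2 y (hp.mem_iff.2 hy)⟩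

theorem heapMin_isMin (l : List (Int × Nat)) (x : Int × Nat) :
    IsMin' (heapMin x l) (x :: l) := by
  induction l generalizing x with
  | nil => exact ⟨by simp [heapMin], by simp [heapMin]⟩
  | cons y l ih =>
      simp only [heapMin]
      have ihz := ih (if lexLt y x then y else x)
      have hzx : (if lexLt y x then y else x) = x ∨ lexLt (if lexLt y x then y else x) x = true := by
        split
        · right; assumption
        · left; rfl
      have hzy : (if lexLt y x then y else x) = y ∨ lexLt (if lexLt y x then y else x) y = true := by
        split
        · left; rfl
        · rename_i hne
          rcases not_lexLt hne with h | h
          · left; exact h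
          · right; exact h
      have hmz : heapMin (if lexLt y x then y else x) l = (if lexLt y x then y else x) ∨
          lexLt (heapMin (if lexLt y x then y else x) l) (if lexLt y x then y else x) = true :=
        ihz.2 _ (List.mem_cons_self ..)
      refine ⟨?_, ?_⟩
      · rcases List.mem_cons.1 ihz.1 with h | h
        · rw [h]; split <;> simp
        · simp [h]
      · intro w hw
        rcases List.mem_cons.1 hw with rfl | hw
        · exact lexLe_trans hmz hzx
        rcases List.mem_cons.1 hw with rfl | hw
        · exact lexLe_trans hmz hzy
        · exact ihz.2 w (List.mem_cons_of_mem _ hw)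

def foldLex (best : Option (Int × Nat)) (l : List (Int × Nat)) : Option (Int × Nat) :=
  match l with
  | [] => best
  | p :: l =>
      foldLex
        (match best with
         | none => some p
         | some b => if lexLt p b then some p else best) l

theorem foldLex_some (l : List (Int × Nat)) :
    ∀ x, foldLex (some x) l = some (heapMin x l) := by
  induction l with
  | nil => intro x; rfl
  | cons p l ih =>
      intro x
      simp only [foldLex, heapMin]
      by_cases h : lexLt p x = true <;> simp [h, ih]

theorem foldLex_none_cons (x : Int × Nat) (l : List (Int × Nat)) :
    foldLex none (x :: l) = some (heapMin x l) := by
  simp only [foldLex]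
  exact foldLex_some l x

theorem foldB_eq_foldLex : ∀ (l : List (Int × Nat)) (b : Option (Int × Nat)),
    (∀ p ∈ l, ∀ q, b = some q → q.2 < p.2) →
    l.Pairwise (fun p r : Int × Nat => p.2 < r.2) →
    foldB b l = foldLex b l := by
  intro l
  induction l with
  | nil => intros; rfl
  | cons p l ih =>
      intro b hb hp
      rw [List.pairwise_cons] at hp
      simp only [foldB, foldLex]
      cases b with
      | none =>
          apply ih
          · intro r hr q hq2
            simp only [Option.some.injEq] at hq2
            rw [← hq2]
            exact hp.1 r hr
          · exact hp.2
      | some q =>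
          have hq : q.2 < p.2 := hb p (List.mem_cons_self ..) q rfl
          dsimp only
          by_cases hc : p.1 < q.1
          · have hlt : lexLt p q = true := by rw [lexLt_iff]; left; exact hc
            rw [if_pos hc, if_pos hlt]
            apply ih
            · intro r hr q' hq2
              simp only [Option.some.injEq] at hq2
              rw [← hq2]
              exact hp.1 r hr
            · exact hp.2
          · have hlt : ¬ lexLt p q = true := by
              rw [lexLt_iff]
              rintro (h | ⟨h1, h2⟩)
              · exact hc h
              · omega
            rw [if_neg hc, if_neg hlt]
            apply ih
            · intro r hr q' hq2
              simp only [Option.some.injEq] at hq2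
              rw [← hq2]
              exact hb r (List.mem_cons_of_mem _ hr) q rfl
            · exact hp.2

theorem front_lb (vs : List (List Int)) :
    ∀ (i : Nat) (m : Int × Nat), m ∈ front i vs → i ≤ m.2 := by
  induction vs with
  | nil => intro i m h; simp [front] at h
  | cons l rest ih =>
      intro i m h
      simp only [front] at h
      cases hg : l.getLast? with
      | none =>
          rw [hg] at h
          have := ih (i + 1) m h
          omega
      | some v =>
          rw [hg] at h
          rcases List.mem_cons.1 h with rfl | h
          · simp
          · have := ih (i + 1) m h
            omega

theorem front_pairwise (vs : List (List Int)) :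
    ∀ i, (front i vs).Pairwise (fun p r : Int × Nat => p.2 < r.2) := by
  induction vs with
  | nil => intro i; simp [front]
  | cons l rest ih =>
      intro i
      simp only [front]
      cases l.getLast? with
      | none => exact ih (i + 1)
      | some v =>
          rw [List.pairwise_cons]
          refine ⟨fun r hr => ?_, ih (i + 1)⟩
          have := front_lb rest (i + 1) r hr
          simp; omega

theorem bestScan_min {vs : List (List Int)} {x : Int × Nat} {hs : List (Int × Nat)}
    (hperm : (x :: hs).Perm (front 0 vs)) :
    bestScan 0 vs none = some (heapMin x hs) := by
  have hmin := isMin_perm hperm (heapMin_isMin hs x)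
  cases hf : front 0 vs with
  | nil =>
      rw [hf] at hperm
      have := hperm.length_eq
      simp at this
  | cons f fs =>
      rw [bestScan_eq_foldB, hf, foldB_eq_foldLex _ _ (by simp)
        (by rw [← hf]; exact front_pairwise vs 0), foldLex_none_cons]
      have hmin2 : IsMin' (heapMin f fs) (front 0 vs) := by
        rw [hf]; exact heapMin_isMin fs f
      exact congrArg some (isMin_unique hmin2 hmin)

theorem getLastD_of_ne_nil {l : List Int} (h : l ≠ []) :
    l.getLast? = some (l.getLastD 0) := by
  cases hg : l.getLast? with
  | none => exact absurd (List.getLast?_eq_none_iff.1 hg) h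
  | some w => simp [List.getLastD_eq_getLast?, hg]

theorem front_set : ∀ (vs : List (List Int)) (j : Nat) (l' : List Int) (i : Nat)
    (hj : j < vs.length), vs[j] ≠ [] →
    (front i (vs.set j l')).Perm
      ((match l'.getLast? with | none => [] | some w => [(w, i + j)]) ++
        (front i vs).erase (vs[j].getLastD 0, i + j)) := by
  intro vs
  induction vs with
  | nil => intro j _ _ hj; simp at hj
  | cons l0 rest ih =>
      intro j l' i hj hne
      cases j with
      | zero =>
          simp only [List.getElem_cons_zero] at hne ⊢
          have hg : l0.getLast? = some (l0.getLastD 0) := getLastD_of_ne_nil hne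
          simp only [List.set, front, hg, Nat.add_zero]
          rw [List.erase_cons_head]
          cases hl' : l'.getLast? with
          | none => simp
          | some w => simp
      | succ j =>
          have hj' : j < rest.length := by simpa using hj
          have hne' : rest[j] ≠ [] := by simpa using hne
          have IH := ih j l' (i + 1) hj' hne'
          have harith : i + 1 + j = i + (j + 1) := by omega
          rw [harith] at IH
          simp only [List.set, front, List.getElem_cons_succ] at *
          cases hg : l0.getLast? with
          | none => exact IH
          | some v0 =>
              have hne2 : ¬ ((v0, i) = ((rest[j].getLastD 0 : Int), i + (j + 1))) := by
                simp only [Prod.mk.injEq, not_and]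
                intro _; omega
              rw [List.erase_cons]
              simp only [beq_iff_eq, hne2, if_false]
              refine List.Perm.trans (List.Perm.cons _ IH) ?_
              cases l'.getLast? with
              | none => simp
              | some w => exact (List.perm_middle).symm

theorem aLoop_nil (values : List (List Int)) (result day : Int) :
    aLoop values [] result day = result := by
  rw [aLoop.eq_def]

theorem aLoop_cons (values : List (List Int)) (x : Int × Nat) (hs : List (Int × Nat))
    (result day : Int) :
    aLoop values (x :: hs) result day =
      if (values.getD (heapMin x hs).2 []) = [] then
        aLoop values ((x :: hs).erase (heapMin x hs)) (result + (heapMin x hs).1 * day) (day + 1)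
      else
        aLoop (values.set (heapMin x hs).2 (values.getD (heapMin x hs).2 []).dropLast)
          (((x :: hs).erase (heapMin x hs)) ++
            [((values.getD (heapMin x hs).2 []).getLastD 0, (heapMin x hs).2)])
          (result + (heapMin x hs).1 * day) (day + 1) := by
  rw [aLoop.eq_def]
  simp only [dite_eq_ite]

theorem front_eq_nil (vs : List (List Int)) :
    ∀ i, (∀ l ∈ vs, l = []) → front i vs = [] := by
  induction vs with
  | nil => intro i _; rfl
  | cons l rest ih =>
      intro i hall
      have h0 : l = [] := hall l (List.mem_cons_self ..)
      simp only [front, h0]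
      exact ih (i + 1) (fun l hl => hall l (List.mem_cons_of_mem _ hl))

theorem loop_eq_nil (vs : List (List Int)) (result day : Int)
    (hf : front 0 vs = []) :
    aLoop (vs.map List.dropLast) [] result day = bLoop vs result day := by
  have hbest : bestScan 0 vs none = none := by
    rw [bestScan_eq_foldB, hf]; rfl
  rw [aLoop_nil, bLoop.eq_def]
  split
  · rfl
  · rename_i v i hb
    rw [hbest] at hb
    exact absurd hb (by simp)

theorem loop_eq (n : Nat) : ∀ (vs : List (List Int)), (vs.map List.length).sum ≤ n →
    ∀ (h : List (Int × Nat)) (result day : Int), h.Perm (front 0 vs) →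
    aLoop (vs.map List.dropLast) h result day = bLoop vs result day := by
  induction n with
  | zero =>
      intro vs hs h result day hperm
      have hall : ∀ l ∈ vs, l = [] := by
        intro l hl
        have h0 := List.sum_eq_zero_iff.1 (Nat.le_zero.1 hs) l.length
          (List.mem_map.2 ⟨l, hl, rfl⟩)
        exact List.length_eq_zero_iff.1 h0
      have hf : front 0 vs = [] := front_eq_nil vs 0 hall
      have hnil : h = [] := by
        rw [hf] at hperm
        exact hperm.eq_nil
      subst hnil
      exact loop_eq_nil vs result day hf
  | succ n ih =>
      intro vs hs h result day hperm
      cases h with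
      | nil =>
          have hf : front 0 vs = [] := hperm.symm.eq_nil
          exact loop_eq_nil vs result day hf
      | cons x hs' =>
          have hmin : IsMin' (heapMin x hs') (front 0 vs) :=
            isMin_perm hperm (heapMin_isMin hs' x)
          obtain ⟨t, ht, hjt, hlast⟩ := front_mem vs 0 hmin.1
          have hj : (heapMin x hs').2 = t := by omega
          have hne : vs[t] ≠ [] := by
            intro hc; rw [hc] at hlast; simp at hlast
          have hlastD : vs[t].getLastD 0 = (heapMin x hs').1 := by
            rw [List.getLastD_eq_getLast?, hlast]; rfl
          have hbest : bestScan 0 vs none = some (heapMin x hs') := bestScan_min hperm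
          have hgd : (vs.map List.dropLast).getD (heapMin x hs').2 [] = vs[t].dropLast := by
            rw [hj, List.getD_eq_getElem?_getD, List.getElem?_map,
              List.getElem?_eq_getElem ht]; rfl
          have hgd2 : vs.getD (heapMin x hs').2 [] = vs[t] := by
            rw [hj, List.getD_eq_getElem?_getD, List.getElem?_eq_getElem ht]; rfl
          -- the pair A pops is the j-entry of the frontier
          have hpair : ((vs[t].getLastD 0 : Int), 0 + t) = heapMin x hs' := by
            rw [hlastD]
            exact Prod.ext rfl (by omega)
          -- total size goes down by one
          have hsum := sumLen_set vs t vs[t].dropLast ht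
          have hlen : 0 < vs[t].length := List.length_pos_of_ne_nil hne
          have hsum' : ((vs.set t vs[t].dropLast).map List.length).sum ≤ n := by
            rw [List.length_dropLast] at hsum
            omega
          rw [aLoop_cons, hgd, bLoop.eq_def]
          by_cases hl : vs[t].dropLast = []
          · rw [if_pos hl]
            split
            · rename_i hb
              rw [hbest] at hb
              exact absurd hb (by simp)
            rename_i v i hb
            rw [hbest] at hb
            have hvi : heapMin x hs' = (v, i) := by simpa using hb
            obtain ⟨rfl, rfl⟩ : v = (heapMin x hs').1 ∧ i = (heapMin x hs').2 := by
              rw [hvi]; exact ⟨rfl, rfl⟩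
            rw [hgd2, hj]
            have hval : (vs[t].dropLast).dropLast = ([] : List Int) := by rw [hl]; rfl
            have hmapeq : vs.map List.dropLast = (vs.set t vs[t].dropLast).map List.dropLast := by
              rw [List.map_set, hval]
              have hmt : (vs.map List.dropLast)[t]'(by simpa using ht) = [] := by
                rw [List.getElem_map]; exact hl
              rw [← hmt, List.set_getElem_self]
            have hpm : ((x :: hs').erase (heapMin x hs')).Perm
                (front 0 (vs.set t vs[t].dropLast)) := by
              have h1 := front_set vs t vs[t].dropLast 0 ht hne
              have hg0 : (vs[t].dropLast).getLast? = none := by simp [hl]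
              rw [hg0] at h1
              simp only [List.nil_append] at h1
              rw [hpair] at h1
              exact (hperm.erase _).trans h1.symm
            rw [hmapeq]
            exact ih _ hsum' _ _ _ hpm
          · rw [if_neg hl]
            split
            · rename_i hb
              rw [hbest] at hb
              exact absurd hb (by simp)
            rename_i v i hb
            rw [hbest] at hb
            have hvi : heapMin x hs' = (v, i) := by simpa using hb
            obtain ⟨rfl, rfl⟩ : v = (heapMin x hs').1 ∧ i = (heapMin x hs').2 := by
              rw [hvi]; exact ⟨rfl, rfl⟩
            rw [hgd2, hj]
            have hmapeq : (vs.map List.dropLast).set t vs[t].dropLast.dropLast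
                = (vs.set t vs[t].dropLast).map List.dropLast := by
              rw [List.map_set]
            have hg0 : (vs[t].dropLast).getLast? = some ((vs[t].dropLast).getLastD 0) :=
              getLastD_of_ne_nil hl
            have hpm : ((x :: hs').erase (heapMin x hs') ++ [((vs[t].dropLast).getLastD 0, t)]).Perm
                (front 0 (vs.set t vs[t].dropLast)) := by
              have h1 := front_set vs t vs[t].dropLast 0 ht hne
              rw [hg0, hpair] at h1
              refine List.Perm.trans ?_ h1.symm
              refine List.Perm.trans (List.perm_append_comm) ?_
              simp only [Nat.zero_add]
              exact List.Perm.append_left _ (hperm.erase _)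
            rw [hmapeq]
            exact ih _ hsum' _ _ _ hpm

theorem initHeap_eq_front (values : List (List Int)) :
    ∀ i, [] ∉ values → initHeap i values = front i values := by
  induction values with
  | nil => intro i _; rfl
  | cons vs rest ih =>
      intro i hne
      simp only [List.mem_cons, not_or] at hne
      obtain ⟨h1, h2⟩ := hne
      have : vs.getLast? = some (vs.getLastD 0) := by
        cases hg : vs.getLast? with
        | none => exact absurd (List.getLast?_eq_none_iff.1 hg) (Ne.symm h1)
        | some w => simp [List.getLastD_eq_getLast?, hg]
      simp only [initHeap, front, this, ih (i + 1) h2]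

-- ===== VERDICT (by name: the statement is the Claim_ definition above) =====
theorem maxSpending_spec : Claim_equal_maxSpending := by
  intro values _ hpre
  unfold Spec_maxSpending maxSpending maxSpending_alt
  rw [initHeap_eq_front values 0 hpre]
  exact loop_eq _ values le_rfl _ 0 1 (List.Perm.refl _)
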